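-- pv_equiv track=rewrite | github.com/HKUDS/nanobot | nanobot/agent/rag.py | _window_messages
-- ===== SOURCE A (Python) =====
-- _MSG_WINDOW = 4          # messages per conversation window
--
-- _MSG_STEP = 2            # step between windows (creates overlap)
--
-- def _window_messages(messages: list[dict], window: int = _MSG_WINDOW, step: int = _MSG_STEP) -> list[str]:
--     """Produce overlapping windows of messages as text blocks."""
--     blocks: list[str] = []
--     for i in range(0, max(1, len(messages) - window + 1), step):
--         segment = messages[i : i + window]
--         lines = []
--         for m in segment:
--             if not m.get("content"):
--                 continue
--             role = m.get("role", "?").upper()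
--             ts = m.get("timestamp", "")[:16]
--             prefix = f"[{ts}] {role}: " if ts else f"{role}: "
--             content = m["content"]
--             if not isinstance(content, str):
--                 content = str(content)
--             lines.append(prefix + content[:800])
--         text = "\n".join(lines).strip()
--         if text:
--             blocks.append(text)
--     return blocks
-- ===== SOURCE B (Python) =====
-- def _window_messages(messages: list[dict], window: int = 4, step: int = 2) -> list[str]:
--     """Precompute each message's formatted line once, then window over the table."""
--     formatted = []
--     for m in messages:
--         content = m.get("content")
--         if not content:
--             formatted.append(None)
--             continue
--         role = m.get("role", "?").upper()
--         ts = m.get("timestamp", "")[:16]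
--         prefix = f"[{ts}] {role}: " if ts else f"{role}: "
--         if not isinstance(content, str):
--             content = str(content)
--         formatted.append(prefix + content[:800])
--     blocks = []
--     for i in range(0, max(1, len(messages) - window + 1), step):
--         text = "\n".join(line for line in formatted[i:i + window] if line is not None).strip()
--         if text:
--             blocks.append(text)
--     return blocks
-- ===== Notes on version B (the rewrite author's own statement) =====
-- stated objective: alternative
-- what changed: B formats every message exactly once into a sentinel table in a first pass, then a second pass only slices the table, drops sentinels and joins per window, instead of A's nested loop that re-formats each message inside every overlapping window.
import Mathlib
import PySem

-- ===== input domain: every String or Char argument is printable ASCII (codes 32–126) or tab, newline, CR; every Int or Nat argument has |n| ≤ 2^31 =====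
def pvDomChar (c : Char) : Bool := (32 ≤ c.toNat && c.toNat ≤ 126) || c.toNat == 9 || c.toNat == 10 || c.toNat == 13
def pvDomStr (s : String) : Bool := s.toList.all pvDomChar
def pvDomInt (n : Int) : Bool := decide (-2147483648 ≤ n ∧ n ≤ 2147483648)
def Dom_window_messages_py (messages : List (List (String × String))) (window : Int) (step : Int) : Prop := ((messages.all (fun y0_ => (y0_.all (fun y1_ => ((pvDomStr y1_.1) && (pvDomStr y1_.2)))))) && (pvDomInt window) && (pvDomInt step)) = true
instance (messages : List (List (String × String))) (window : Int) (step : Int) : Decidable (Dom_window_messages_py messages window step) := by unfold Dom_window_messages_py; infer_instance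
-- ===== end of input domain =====

-- B formats every message once into a sentinel table, then a second pass slices the table per window;
-- A re-formats each message inside every overlapping window. Equivalence is proved for step ≠ 0 (A raises otherwise).

-- ===== PORT A =====
def window_messages_py (messages : List (List (String × String))) (window : Int) (step : Int) : List String :=
  (PySem.List.pyRange 0 (max 1 ((messages.length : Int) - window + 1)) step).foldl
    (fun blocks i =>
      let segment := PySem.List.slice messages (some i) (some (i + window))
      let lines := segment.foldl (fun lines m =>
        let d := PySem.Dict.mk m
        match d.get? "content" with
        | none => lines            -- m.get("content") is None → falsy → continue
        | some content =>
          if content = "" then lines   -- empty string is falsy → continue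
          else
            let role := PySem.Str.upper (d.getD "role" "?")
            let ts := PySem.Str.slice (d.getD "timestamp" "") none (some 16)
            let prefx := if ts ≠ "" then "[" ++ ts ++ "] " ++ role ++ ": " else role ++ ": "
            -- content is a String by the type convention, so the isinstance(str) coercion is the identity
            lines ++ [prefx ++ PySem.Str.slice content none (some 800)]) []
      let text := PySem.Str.strip (PySem.Str.join "\n" lines)
      if text ≠ "" then blocks ++ [text] else blocks) []

-- ===== PORT B =====
-- Source B's first pass: the formatted line of one message, none = the None sentinel
def fmtMsg (m : List (String × String)) : Option String :=
  let d := PySem.Dict.mk m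
  match d.get? "content" with
  | none => none
  | some content =>
    if content = "" then none
    else
      let role := PySem.Str.upper (d.getD "role" "?")
      let ts := PySem.Str.slice (d.getD "timestamp" "") none (some 16)
      let prefx := if ts ≠ "" then "[" ++ ts ++ "] " ++ role ++ ": " else role ++ ": "
      some (prefx ++ PySem.Str.slice content none (some 800))

def window_messages_py_alt (messages : List (List (String × String))) (window : Int) (step : Int) : List String :=
  let formatted := messages.map fmtMsg
  (PySem.List.pyRange 0 (max 1 ((messages.length : Int) - window + 1)) step).foldl
    (fun blocks i =>
      let text := PySem.Str.strip (PySem.Str.join "\n"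
        ((PySem.List.slice formatted (some i) (some (i + window))).filterMap id))
      if text ≠ "" then blocks ++ [text] else blocks) []

-- ===== PRECONDITION & SPEC =====
-- Pre_ excludes step = 0, on which Python's range() (and hence A and B alike) raises ValueError.
def Pre_window_messages_py (messages : List (List (String × String))) (window : Int) (step : Int) : Prop := step ≠ 0
instance (messages : List (List (String × String))) (window : Int) (step : Int) : Decidable (Pre_window_messages_py messages window step) := by unfold Pre_window_messages_py; infer_instance
def pvWitness_window_messages_py : (List (List (String × String))) × Int × Int := ([[("content", "hi"), ("role", "user")]], 4, 2)

def Spec_window_messages_py (messages : List (List (String × String))) (window : Int) (step : Int) (out : List String) : Prop := out = window_messages_py_alt messages window step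
instance (messages : List (List (String × String))) (window : Int) (step : Int) (out : List String) : Decidable (Spec_window_messages_py messages window step out) := by unfold Spec_window_messages_py; infer_instance

-- ===== CLAIM (what is proved, stated in full; the proofs are below) =====
def Claim_equal_window_messages_py : Prop := ∀ (messages : List (List (String × String))) (window : Int) (step : Int), Dom_window_messages_py messages window step → Pre_window_messages_py messages window step → Spec_window_messages_py messages window step (window_messages_py messages window step)

-- ===== LEMMAS AND PROOFS =====

-- slice commutes with map
theorem slice_map {α β : Type} (f : α → β) (xs : List α) (a? b? : Option Int) :
    PySem.List.slice (xs.map f) a? b? = (PySem.List.slice xs a? b?).map f := by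
  simp [PySem.List.slice]

-- A's inner loop over a segment computes the segment's formatted lines
theorem lines_eq (seg : List (List (String × String))) (acc : List String) :
    seg.foldl (fun lines m =>
        let d := PySem.Dict.mk m
        match d.get? "content" with
        | none => lines
        | some content =>
          if content = "" then lines
          else
            let role := PySem.Str.upper (d.getD "role" "?")
            let ts := PySem.Str.slice (d.getD "timestamp" "") none (some 16)
            let prefx := if ts ≠ "" then "[" ++ ts ++ "] " ++ role ++ ": " else role ++ ": "
            lines ++ [prefx ++ PySem.Str.slice content none (some 800)]) acc
    = acc ++ (seg.map fmtMsg).filterMap id := by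
  induction seg generalizing acc with
  | nil => simp
  | cons m rest ih =>
    simp only [List.foldl_cons, List.map_cons, List.filterMap_cons, ih, fmtMsg]
    cases h : (PySem.Dict.mk m).get? "content" with
    | none => simp
    | some c =>
      by_cases hc : c = "" <;> simp [hc]

-- ===== VERDICT (by name: the statement is the Claim_ definition above) =====
theorem window_messages_py_spec : Claim_equal_window_messages_py := by
  intro messages window step _ _
  unfold Spec_window_messages_py window_messages_py window_messages_py_alt
  simp only [slice_map, lines_eq, List.nil_append]
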